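-- pv_equiv track=rewrite | github.com/tedunderwood/time | 2018parsetime.py | countalpha
-- ===== SOURCE A (Python) =====
-- def removenewline(text):
--     text = text.replace('\n', ' ')
--     text = text.replace('<pb>', ' ')
--     text = text.replace('  ', ' ')
--     return text.strip()
--
-- def countalpha(text):
--     text = removenewline(text)
--     words = text.split(' ')
--     ctr = 0
--     for w in words:
--         for c in w:
--             if c.isalpha():
--                 ctr += 1
--                 break
--     return ctr
-- ===== SOURCE B (Python) =====
-- def removenewline(text):
--     text = text.replace('\n', ' ')
--     text = text.replace('<pb>', ' ')
--     text = text.replace('  ', ' ')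
--     return text.strip()
--
-- def countalpha(text):
--     # single char-by-char pass: count non-space runs that contain an alpha char
--     text = removenewline(text)
--     ctr = 0
--     seen = False
--     for c in text:
--         if c == ' ':
--             if seen:
--                 ctr += 1
--             seen = False
--         elif c.isalpha():
--             seen = True
--     return ctr + (1 if seen else 0)
-- ===== Notes on version B (the rewrite author's own statement) =====
-- stated objective: alternative
-- what changed: Replaced splitting on spaces plus a nested per-word character loop by one character-by-character pass over the normalized text that maintains a seen-alpha flag per non-space run and counts runs at each space (flushing the trailing run).
import Mathlib
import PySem

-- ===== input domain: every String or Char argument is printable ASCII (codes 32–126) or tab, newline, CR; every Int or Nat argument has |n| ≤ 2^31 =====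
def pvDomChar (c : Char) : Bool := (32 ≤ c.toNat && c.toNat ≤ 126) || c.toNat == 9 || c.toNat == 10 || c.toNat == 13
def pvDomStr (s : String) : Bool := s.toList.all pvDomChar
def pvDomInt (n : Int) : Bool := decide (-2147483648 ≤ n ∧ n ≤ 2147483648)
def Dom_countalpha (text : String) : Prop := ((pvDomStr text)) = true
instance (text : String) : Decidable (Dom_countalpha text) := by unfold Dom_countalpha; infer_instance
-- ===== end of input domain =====

-- B replaces the split-into-words plus nested inner loop by a single character pass with a
-- per-run seen-alpha flag (objective: alternative decomposition, same O(n) cost).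

-- ===== PORT A =====
def removenewline (text : String) : String :=
  let t1 := PySem.Str.replace text "\n" " "
  let t2 := PySem.Str.replace t1 "<pb>" " "
  let t3 := PySem.Str.replace t2 "  " " "
  PySem.Str.strip t3

-- inner 'for c in w: if c.isalpha(): ctr += 1; break' — true iff the loop breaks
def hasAlpha : List Char → Bool
  | [] => false
  | c :: rest => if PySem.Chars.isalpha c then true else hasAlpha rest

def countalpha (text : String) : Int :=
  let t := removenewline text
  let words := PySem.Chars.splitOn t.toList [' ']
  words.foldl (fun ctr w => if hasAlpha w then ctr + 1 else ctr) 0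

-- ===== PORT B =====
def altStep (p : Int × Bool) (c : Char) : Int × Bool :=
  if c = ' ' then (if p.2 then (p.1 + 1, false) else (p.1, false))
  else if PySem.Chars.isalpha c then (p.1, true)
  else p

def countalpha_alt (text : String) : Int :=
  let t := removenewline text
  let p := t.toList.foldl altStep ((0 : Int), false)
  p.1 + (if p.2 then 1 else 0)

-- ===== PRECONDITION & SPEC =====
def Spec_countalpha (text : String) (out : Int) : Prop := out = countalpha_alt text
instance (text : String) (out : Int) : Decidable (Spec_countalpha text out) := by unfold Spec_countalpha; infer_instance

-- ===== CLAIM (what is proved, stated in full; the proofs are below) =====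
def Claim_equal_countalpha : Prop := ∀ (text : String), Dom_countalpha text → Spec_countalpha text (countalpha text)

-- ===== LEMMAS AND PROOFS =====

-- number of remaining counted words, given whether the current run has seen an alpha char
def g : List Char → Bool → Int
  | [], seen => if seen then 1 else 0
  | c :: cs, seen =>
    if c = ' ' then (if seen then 1 else 0) + g cs false
    else g cs (seen || PySem.Chars.isalpha c)

theorem hasAlpha_eq_any (l : List Char) : hasAlpha l = l.any PySem.Chars.isalpha := by
  induction l with
  | nil => rfl
  | cons c r ih => simp [hasAlpha, ih]

theorem go_count (fuel : Nat) (cs : List Char) (h : cs.length ≤ fuel)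
    (cur : List Char) (acc : List (List Char)) :
    (PySem.Chars.splitOn.go [' '] fuel cs cur acc).foldl
        (fun ctr w => if hasAlpha w then ctr + 1 else ctr) 0
      = acc.reverse.foldl (fun ctr w => if hasAlpha w then ctr + 1 else ctr) 0
        + g cs (hasAlpha cur.reverse) := by
  induction cs generalizing fuel cur acc with
  | nil =>
    cases fuel <;>
      simp [PySem.Chars.splitOn.go, g, List.foldl_append] <;>
      split_ifs <;> ring
  | cons c rest ih =>
    cases fuel with
    | zero => simp at h
    | succ f =>
      simp only [PySem.Chars.splitOn.go]
      by_cases hc : c = ' '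
      · have hp : List.isPrefixOf [' '] (c :: rest) = true := by
          simp [List.isPrefixOf, hc]
        rw [if_pos hp]
        rw [show List.drop [' '].length (c :: rest) = rest from rfl]
        rw [ih f (by simpa using Nat.le_of_succ_le_succ h) [] (cur.reverse :: acc)]
        simp [g, hc, List.foldl_append, hasAlpha]
        split_ifs <;> ring
      · have hp : List.isPrefixOf [' '] (c :: rest) = false := by
          simp [List.isPrefixOf]; exact fun h' => hc h'.symm
        rw [if_neg (by simp [hp])]
        rw [ih f (by simpa using Nat.le_of_succ_le_succ h) (c :: cur) acc]
        have : hasAlpha ((c :: cur).reverse) = (hasAlpha cur.reverse || PySem.Chars.isalpha c) := by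
          simp [hasAlpha_eq_any, List.any_reverse, List.any_cons, Bool.or_comm]
        rw [this]
        simp [g, hc]

theorem foldl_alt_eq (cs : List Char) (ctr : Int) (seen : Bool) :
    (cs.foldl altStep (ctr, seen)).1 + (if (cs.foldl altStep (ctr, seen)).2 then 1 else 0)
      = ctr + g cs seen := by
  induction cs generalizing ctr seen with
  | nil => simp [g]
  | cons c rest ih =>
    simp only [List.foldl_cons, altStep, g]
    by_cases hc : c = ' '
    · cases seen <;> simp [hc, ih]
      ring
    · by_cases ha : PySem.Chars.isalpha c <;> simp [hc, ha, ih]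

theorem splitOn_eq (cs : List Char) :
    PySem.Chars.splitOn cs [' '] = PySem.Chars.splitOn.go [' '] (cs.length + 1) cs [] [] := by
  simp [PySem.Chars.splitOn]

theorem main_eq (cs : List Char) :
    (PySem.Chars.splitOn cs [' ']).foldl (fun ctr w => if hasAlpha w then ctr + 1 else ctr) 0
      = (cs.foldl altStep ((0 : Int), false)).1
        + (if (cs.foldl altStep ((0 : Int), false)).2 then 1 else 0) := by
  rw [splitOn_eq, go_count (cs.length + 1) cs (Nat.le_succ _) [] [], foldl_alt_eq]
  simp [hasAlpha]

-- ===== VERDICT (by name: the statement is the Claim_ definition above) =====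
theorem countalpha_spec : Claim_equal_countalpha := by
  intro text _
  unfold Spec_countalpha countalpha countalpha_alt
  exact main_eq (removenewline text).toList
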